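-- pv_equiv track=rewrite | github.com/ffavela/mset | mset.py | MG
-- ===== SOURCE A (Python) =====
-- def tOp(xStr, LL):
--     return [[xStr] + e for e in LL]
--
-- def nL(L):
--     if L[0] == 1:
--         return L[1:]
--     return [L[0]-1]+L[1:]
--
-- def MG(M,k):
--     M.sort(key=len, reverse=True)
--     L=[len(m) for m in M]
--     N=sum(L)
--     S=[e for sublist in M for e in sublist]
--     def g(k,L,i=0):
--         if i > N-k:
--             return [ ]
--         if k == 0:
--             return [[ ]]
--         return tOp(S[i],g(k-1,nL(L),i+1))+g(k,L[1:],i+L[0])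
--     return g(k,L)
-- ===== SOURCE B (Python) =====
-- def MG(M, k):
--     M.sort(key=len, reverse=True)
--     def f(gs, k):
--         if not gs:
--             return [[]] if k == 0 else []
--         g, rest = gs[0], gs[1:]
--         out = []
--         for c in reversed(range(min(len(g), k) + 1)):
--             out += [g[:c] + t for t in f(rest, k - c)]
--         return out
--     return f(M, k)
-- ===== Notes on version B (the rewrite author's own statement) =====
-- stated objective: alternative
-- what changed: B recurses over whole groups (choosing a count c per group, c descending) instead of A's per-element take/skip recursion over a flattened list with running index and length-list bookkeeping; infeasible branches die in the empty base case instead of A's explicit i > N-k prune.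
import Mathlib
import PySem

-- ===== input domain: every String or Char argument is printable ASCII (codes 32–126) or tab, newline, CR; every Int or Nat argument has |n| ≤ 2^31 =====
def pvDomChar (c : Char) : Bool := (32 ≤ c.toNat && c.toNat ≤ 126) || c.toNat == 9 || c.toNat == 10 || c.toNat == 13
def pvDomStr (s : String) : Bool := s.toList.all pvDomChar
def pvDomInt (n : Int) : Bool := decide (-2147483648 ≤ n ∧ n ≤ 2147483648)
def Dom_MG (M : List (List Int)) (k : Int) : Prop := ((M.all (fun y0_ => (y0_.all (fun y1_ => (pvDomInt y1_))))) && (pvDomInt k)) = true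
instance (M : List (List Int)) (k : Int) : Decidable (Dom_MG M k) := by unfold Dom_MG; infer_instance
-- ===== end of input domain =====

-- B enumerates the combinations by recursing over whole GROUPS (a count c per group, descending)
-- instead of A's per-element take/skip recursion over the flattened list; equivalence is about the
-- RETURN value only (both Pythons sort M in place the same way, key=len reverse=True).

-- ===== PORT A =====
-- tOp(xStr, LL)
def tOpA (x : Int) (LL : List (List Int)) : List (List Int) := LL.map (fun e => [x] ++ e)

-- nL(L); Python raises IndexError on L == [] (unreachable for inputs in Pre_MG)
def nLA (L : List Int) : List Int :=
  match L with
  | [] => []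
  | a :: t => if a = 1 then t else (a - 1) :: t

-- the inner g(k, L, i); the extra Nat fuel only bounds the recursion depth so the definition is
-- total: for inputs in Pre_MG the fuel passed by MG is never exhausted (gA_fuel_large below).
-- S[i] is PySem.List.pyGetD (in range whenever reached under Pre_MG), L[1:] is L.drop 1.
def gA (S : List Int) (N : Int) : Nat → Int → List Int → Int → List (List Int)
  | 0, _, _, _ => []
  | fuel + 1, k, L, i =>
    if i > N - k then []
    else if k = 0 then [[]]
    else tOpA (PySem.List.pyGetD S i 0) (gA S N fuel (k - 1) (nLA L) (i + 1)) ++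
         gA S N fuel k (L.drop 1) (i + L.headD 0)

def MG (M : List (List Int)) (k : Int) : List (List Int) :=
  let Ms := PySem.List.sorted M (fun m => m.length) true
  let L := Ms.map (fun m => (m.length : Int))
  let N := L.sum
  let S := Ms.flatMap (fun sublist => sublist)
  gA S N (k.toNat + L.length + 1) k L 0

-- ===== PORT B =====
-- f(gs, k): per-group recursion; `for c in reversed(range(min(len(g), k) + 1))` with g[:c] = take c
def fB : List (List Int) → Int → List (List Int)
  | [], k => if k = 0 then [[]] else []
  | g :: rest, k =>
      ((List.range (min (g.length : Int) k + 1).toNat).reverse).foldl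
        (fun out (c : Nat) => out ++ (fB rest (k - (c : Int))).map (fun t => g.take c ++ t)) []

def MG_alt (M : List (List Int)) (k : Int) : List (List Int) :=
  fB (PySem.List.sorted M (fun m => m.length) true) k

-- ===== PRECONDITION & SPEC =====
-- For k < 0 the Python A always raises IndexError (the index runs off the flattened list); that is
-- the only way A can raise, so Pre_MG is exactly 0 ≤ k.
def Pre_MG (M : List (List Int)) (k : Int) : Prop := 0 ≤ k
instance (M : List (List Int)) (k : Int) : Decidable (Pre_MG M k) := by unfold Pre_MG; infer_instance
def pvWitness_MG : List (List Int) × Int := ([[1, 2], [3]], 2)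

def Spec_MG (M : List (List Int)) (k : Int) (out : List (List Int)) : Prop := out = MG_alt M k
instance (M : List (List Int)) (k : Int) (out : List (List Int)) : Decidable (Spec_MG M k out) := by unfold Spec_MG; infer_instance

-- ===== CLAIM (what is proved, stated in full; the proofs are below) =====
def Claim_equal_MG : Prop := ∀ (M : List (List Int)) (k : Int), Dom_MG M k → Pre_MG M k → Spec_MG M k (MG M k)

-- ===== LEMMAS AND PROOFS =====

lemma fB_cons (g : List Int) (rest : List (List Int)) (k : Int) :
    fB (g :: rest) k =
      ((List.range (min (g.length : Int) k + 1).toNat).reverse).flatMap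
        (fun (c : Nat) => (fB rest (k - (c : Int))).map (fun t => g.take c ++ t)) := by
  rw [fB, PySem.List.foldl_append_eq_flatMap]
  simp

lemma fB_zero (gs : List (List Int)) : fB gs 0 = [[]] := by
  induction gs with
  | nil => simp [fB]
  | cons g rest ih =>
      rw [fB_cons]
      have : (min (g.length : Int) 0 + 1).toNat = 1 := by omega
      rw [this]
      simp [ih]

lemma fB_infeasible (gs : List (List Int)) (k : Int) (h : (gs.flatten.length : Int) < k) :
    fB gs k = [] := by
  induction gs generalizing k with
  | nil =>
      simp at h
      rw [fB]
      simp; omega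
  | cons g rest ih =>
      rw [fB_cons, List.flatMap_eq_nil_iff]
      intro c hc
      simp only [List.mem_reverse, List.mem_range] at hc
      have h' : ((rest.flatten.length : Int)) < k - c := by
        simp [List.length_flatten] at h ⊢
        omega
      rw [ih _ h']
      simp

lemma fB_nilhead (rest : List (List Int)) (k : Int) (hk : 0 ≤ k) :
    fB ([] :: rest) k = fB rest k := by
  rw [fB_cons]
  have : (min (([] : List Int).length : Int) k + 1).toNat = 1 := by simp; omega
  rw [this]
  simp

lemma fB_key (x : Int) (g' : List Int) (rest : List (List Int)) (k : Int) (hk : 0 < k) :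
    fB ((x :: g') :: rest) k =
      ((fB (g' :: rest) (k - 1)).map (fun t => x :: t)) ++ fB rest k := by
  rw [fB_cons, fB_cons]
  have h1 : (min ((x :: g').length : Int) k + 1).toNat
      = (min (g'.length : Int) (k - 1) + 1).toNat + 1 := by
    simp only [List.length_cons]
    push_cast
    omega
  rw [h1, List.range_succ_eq_map, List.reverse_cons, List.flatMap_append,
      ← List.map_reverse, List.flatMap_map]
  congr 1
  · rw [List.map_flatMap]
    congr 1
    funext c
    simp [Nat.succ_eq_add_one, List.map_map, Function.comp_def]
    have h2 : k - ((c : Int) + 1) = k - 1 - (c : Int) := by ring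
    rw [h2]
  · simp


lemma gA_eq (S : List Int) (fuel : Nat) : ∀ (gs : List (List Int)) (k : Int) (i : Nat),
    0 ≤ k → k.toNat + gs.length + 1 ≤ fuel →
    gs.Pairwise (fun a b => a = [] → b = []) →
    i ≤ S.length → S.drop i = gs.flatten →
    gA S (S.length : Int) fuel k (gs.map (fun g => (g.length : Int))) (i : Int) = fB gs k := by
  induction fuel with
  | zero => intro gs k i hk hf hE hi hd; omega
  | succ fuel IH =>
    intro gs k i hk hf hE hi hd
    match gs with
    | [] =>
      have hiS : i = S.length := by simp at hd; omega
      subst hiS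
      rw [gA, fB]
      split_ifs with h1 h2 <;> try rfl
      · exfalso; omega
      · exfalso; omega
    | g :: rest =>
      have hlen : i + g.length + rest.flatten.length = S.length := by
        have h := congrArg List.length hd
        rw [List.length_drop] at h
        simp only [List.flatten_cons, List.length_append] at h
        omega
      rw [gA]
      by_cases h1 : (i : Int) > (S.length : Int) - k
      · rw [if_pos h1]
        refine (fB_infeasible _ _ ?_).symm
        simp only [List.flatten_cons, List.length_append]
        push_cast
        omega
      rw [if_neg h1]
      by_cases h2 : k = 0
      · rw [if_pos h2, h2, fB_zero]
      rw [if_neg h2]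
      have hkpos : 0 < k := by omega
      match g, hE, hlen, hd with
      | [], hE, hlen, hd =>
        exfalso
        have hre : rest.flatten = [] := by
          rw [List.flatten_eq_nil_iff]
          intro l hl
          exact (List.pairwise_cons.mp hE).1 l hl rfl
        rw [hre] at hlen
        simp at hlen
        push_cast at h1
        omega
      | x :: g', hE, hlen, hd =>
        have hget : PySem.List.pyGetD S (i : Int) 0 = x := by
          have hgetE : S[i]? = some x := by
            have h0 : (S.drop i)[0]? = some x := by rw [hd]; rfl
            rw [List.getElem?_drop] at h0
            simpa using h0
          rw [PySem.List.pyGetD_natCast, List.getD_eq_getElem?_getD, hgetE]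
          rfl
        have hdrop1 : S.drop (i + 1) = g' ++ rest.flatten := by
          have h0 : (S.drop i).drop 1 = g' ++ rest.flatten := by rw [hd]; simp
          rw [List.drop_drop] at h0
          exact h0
        have hdropg : S.drop (i + (g'.length + 1)) = rest.flatten := by
          have h0 : (S.drop i).drop (x :: g').length = rest.flatten := by
            rw [hd]
            simp only [List.flatten_cons]
            exact List.drop_left
          rw [List.drop_drop] at h0
          simpa using h0
        rw [hget]
        have hskip :
            gA S (S.length : Int) fuel k
              ((((x :: g') :: rest).map (fun g => (g.length : Int))).drop 1)
              ((i : Int) + (((x :: g') :: rest).map (fun g => (g.length : Int))).headD 0)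
            = fB rest k := by
          have hci : (i : Int) + ((x :: g').length : Int) = ((i + (g'.length + 1) : Nat) : Int) := by
            push_cast [List.length_cons]; ring
          simp only [List.map_cons, List.drop_succ_cons, List.drop_zero, List.headD_cons]
          rw [hci]
          exact IH rest k _ hk (by simp at hf ⊢; omega) hE.of_cons (by omega) hdropg
        have htake :
            gA S (S.length : Int) fuel (k - 1)
              (nLA (((x :: g') :: rest).map (fun g => (g.length : Int))))
              ((i : Int) + 1)
            = fB (g' :: rest) (k - 1) := by
          have hci : (i : Int) + 1 = ((i + 1 : Nat) : Int) := by push_cast; ring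
          rw [hci]
          match g', hdrop1 with
          | [], hdrop1 =>
            have hnl : nLA ((((x :: ([] : List Int)) :: rest).map (fun g => (g.length : Int)))) =
                rest.map (fun g => (g.length : Int)) := by
              simp [nLA]
            rw [hnl]
            rw [IH rest (k - 1) (i + 1) (by omega) (by simp at hf ⊢; omega) hE.of_cons
              (by omega) (by simpa using hdrop1)]
            exact (fB_nilhead rest (k - 1) (by omega)).symm
          | y :: g'', hdrop1 =>
            have hnl : nLA ((((x :: y :: g'') :: rest).map (fun g => (g.length : Int)))) =
                ((y :: g'') :: rest).map (fun g => (g.length : Int)) := by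
              simp only [List.map_cons, List.length_cons, nLA]
              rw [if_neg (by push_cast; omega)]
              congr 1
              push_cast; ring
            rw [hnl]
            refine IH ((y :: g'') :: rest) (k - 1) (i + 1) (by omega) (by simp at hf ⊢; omega)
              ?_ (by omega) (by simpa using hdrop1)
            exact List.Pairwise.cons (fun b hb habs => by simp at habs) hE.of_cons
        rw [hskip, htake, fB_key x g' rest k hkpos]
        simp [tOpA]

theorem MG_eq (M : List (List Int)) (k : Int) (hk : 0 ≤ k) : MG M k = MG_alt M k := by
  have hE : (PySem.List.sorted M (fun m => m.length) true).Pairwise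
      (fun (a b : List Int) => a = [] → b = []) := by
    refine (PySem.List.sorted_pairwise_rev M (fun m => m.length)).imp ?_
    intro a b hab ha
    subst ha
    simp at hab
    exact hab
  unfold MG MG_alt
  generalize PySem.List.sorted M (fun m => m.length) true = Ms at hE ⊢
  show gA (Ms.flatMap (fun sublist => sublist))
      ((Ms.map (fun m => (m.length : Int))).sum)
      (k.toNat + (Ms.map (fun m => (m.length : Int))).length + 1) k
      (Ms.map (fun m => (m.length : Int))) 0 = fB Ms k
  have hS : Ms.flatMap (fun sublist => sublist) = Ms.flatten := by simp
  have hN : (Ms.map (fun m => (m.length : Int))).sum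
      = ((Ms.flatMap (fun sublist => sublist)).length : Int) := by
    rw [hS, List.length_flatten, Nat.cast_list_sum, List.map_map]
    rfl
  rw [hN]
  have h0 : (0 : Int) = ((0 : Nat) : Int) := rfl
  rw [h0]
  exact gA_eq _ _ Ms k 0 hk (by simp) hE (by simp) (by simp [hS])

-- ===== VERDICT (by name: the statement is the Claim_ definition above) =====
theorem MG_spec : Claim_equal_MG := by
  intro M k _dom hpre
  unfold Spec_MG
  exact MG_eq M k hpre
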